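-- pv_equiv track=rewrite | github.com/xjfcnfw3/algorithm | programers/후보키.py | solution
-- ===== SOURCE A (Python) =====
-- from itertools import combinations
--
-- def solution(relation):
--     answer = []
--     columns = [i for i in range(len(relation[0]))]
--
--     def check(key):
--         for a in answer:
--             temp = True
--             for c in a:
--                 if c not in key:
--                     temp = False
--                     break
--             if temp:
--                 return False
--         return True
--
--     for i in range(1, len(relation[0]) + 1):
--         for r in combinations(columns, i):
--             tup = set()
--             for row in relation:
--                 temp = ""
--                 for col in r:
--                     temp += str(row[col]) + " " + str(col) + " "
--                 tup.add(temp)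
--             if len(tup) == len(relation):
--                 if check(r):
--                     answer.append(r)
--
--     return len(answer)
-- ===== SOURCE B (Python) =====
-- def solution(relation):
--     n = len(relation[0])
--
--     def sig(row, cols):
--         temp = ""
--         for c in cols:
--             temp += str(row[c]) + " " + str(c) + " "
--         return temp
--
--     def unique(cols):
--         return len({sig(row, cols) for row in relation}) == len(relation)
--
--     def subsets(xs):
--         if not xs:
--             return [[]]
--         rest = subsets(xs[1:])
--         return rest + [[xs[0]] + s for s in rest]
--
--     count = 0
--     for r in subsets(list(range(n))):
--         if r and unique(r) and all(not unique(s) for s in subsets(r) if s and s != r):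
--             count += 1
--     return count
-- ===== Notes on version B (the rewrite author's own statement) =====
-- stated objective: alternative
-- what changed: A's global accumulated answer-list with a subset check against previously accepted keys is replaced by a stateless local minimality test: B counts a unique column subset iff none of its proper nonempty sub-subsets is unique, enumerating subsets via a recursively built powerset instead of per-size combinations.
import Mathlib
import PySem

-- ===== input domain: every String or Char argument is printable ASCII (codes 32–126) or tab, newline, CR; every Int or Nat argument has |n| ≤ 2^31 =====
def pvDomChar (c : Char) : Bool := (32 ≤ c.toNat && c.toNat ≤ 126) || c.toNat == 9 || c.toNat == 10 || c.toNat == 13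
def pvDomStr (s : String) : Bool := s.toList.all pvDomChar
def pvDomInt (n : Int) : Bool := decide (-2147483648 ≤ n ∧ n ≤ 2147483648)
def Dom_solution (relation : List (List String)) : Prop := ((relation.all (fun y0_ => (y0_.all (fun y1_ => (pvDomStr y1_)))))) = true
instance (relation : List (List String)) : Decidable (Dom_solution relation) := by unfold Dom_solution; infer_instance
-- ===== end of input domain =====

-- B replaces A's global accepted-keys list and subset check by a local minimality test
-- (a subset counts iff no proper nonempty sub-subset is itself unique) over a
-- recursively generated powerset; objective: alternative decomposition, not speed.

-- ===== PORT A =====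
-- str(row[col]) + " " + str(col) + " " accumulated over the columns of r (A's inner row loop)
def rowSigA (row : List String) (r : List Int) : String :=
  r.foldl (fun temp col =>
    temp ++ PySem.List.pyGetD row col "" ++ " " ++ PySem.Int.toStr col ++ " ") ""

-- A's nested function 'check'
def checkA : List (List Int) → List Int → Bool
  | [], _ => true
  | a :: rest, key => if a.all (fun c => key.contains c) then false else checkA rest key

-- the body of A's inner 'for r in combinations(columns, i)' loop
def stepA (relation : List (List String)) (answer : List (List Int)) (r : List Int) :
    List (List Int) :=
  let tup : PySem.Set String :=
    relation.foldl (fun tup row => PySem.Set.add tup (rowSigA row r)) PySem.Set.empty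
  if PySem.Set.len tup == PySem.List.len relation then
    if checkA answer r then answer ++ [r] else answer
  else answer

def solution (relation : List (List String)) : Int :=
  let first := (PySem.List.pyGet? relation 0).getD []
  let columns : List Int := PySem.List.pyRange 0 (PySem.List.len first) 1
  let answer :=
    (PySem.List.pyRange 1 (PySem.List.len first + 1) 1).foldl
      (fun answer i =>
        (PySem.List.combinations columns i.toNat).foldl (stepA relation) answer)
      ([] : List (List Int))
  PySem.List.len answer

-- ===== PORT B =====
-- B's nested function 'sig'
def rowSigB (row : List String) (cols : List Int) : String :=
  cols.foldl (fun temp c =>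
    temp ++ PySem.List.pyGetD row c "" ++ " " ++ PySem.Int.toStr c ++ " ") ""

-- B's nested function 'unique'
def uniqueB (relation : List (List String)) (cols : List Int) : Bool :=
  PySem.Set.len (PySem.Set.ofList (relation.map (fun row => rowSigB row cols)))
    == PySem.List.len relation

-- B's nested function 'subsets'
def subsetsB : List Int → List (List Int)
  | [] => [[]]
  | x :: xs =>
    let rest := subsetsB xs
    rest ++ rest.map (x :: ·)

def solution_alt (relation : List (List String)) : Int :=
  let first := (PySem.List.pyGet? relation 0).getD []
  let columns : List Int := PySem.List.pyRange 0 (PySem.List.len first) 1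
  (subsetsB columns).foldl
    (fun count r =>
      if !r.isEmpty && uniqueB relation r &&
          (subsetsB r).all (fun s => s.isEmpty || s == r || !uniqueB relation s)
      then count + 1 else count)
    0

-- ===== PRECONDITION & SPEC =====
-- Pre_ excludes exactly the inputs where Python A raises: the empty relation (relation[0]
-- is an IndexError) and relations with a row shorter than the first row (row[col] IndexError).
def Pre_solution (relation : List (List String)) : Prop :=
  relation ≠ [] ∧ ∀ row ∈ relation, relation.headI.length ≤ row.length

instance (relation : List (List String)) : Decidable (Pre_solution relation) := by
  unfold Pre_solution; infer_instance

def pvWitness_solution : List (List String) := [["a", "b"], ["c", "b"]]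

def Spec_solution (relation : List (List String)) (out : Int) : Prop := out = solution_alt relation
instance (relation : List (List String)) (out : Int) : Decidable (Spec_solution relation out) := by
  unfold Spec_solution; infer_instance

-- ===== CLAIM (what is proved, stated in full; the proofs are below) =====
def Claim_equal_solution : Prop := ∀ (relation : List (List String)),
  Dom_solution relation → Pre_solution relation → Spec_solution relation (solution relation)

-- ===== LEMMAS AND PROOFS =====

-- B's per-subset acceptance test (the condition of B's counting loop)
def pB (relation : List (List String)) (r : List Int) : Bool :=
  !r.isEmpty && uniqueB relation r &&
    (subsetsB r).all (fun s => s.isEmpty || s == r || !uniqueB relation s)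

lemma mem_subsetsB {s l : List Int} : s ∈ subsetsB l ↔ s.Sublist l := by
  induction l generalizing s with
  | nil => simp [subsetsB]
  | cons x xs ih =>
    simp only [subsetsB, List.mem_append, List.mem_map, List.sublist_cons_iff, ih]
    constructor
    · rintro (h | ⟨t, ht, rfl⟩)
      · exact Or.inl h
      · exact Or.inr ⟨t, rfl, ht⟩
    · rintro (h | ⟨t, rfl, ht⟩)
      · exact Or.inl h
      · exact Or.inr ⟨t, ht, rfl⟩

lemma nodup_subsetsB {l : List Int} (h : l.Nodup) : (subsetsB l).Nodup := by
  induction l with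
  | nil => simp [subsetsB]
  | cons x xs ih =>
    have hx : x ∉ xs := (List.nodup_cons.mp h).1
    have hnd := ih (List.nodup_cons.mp h).2
    simp only [subsetsB]
    refine List.Nodup.append hnd (hnd.map (fun a b hab => by injection hab)) ?_
    intro s hs hs'
    obtain ⟨t, _, rfl⟩ := List.mem_map.mp hs'
    have : x ∈ xs := (mem_subsetsB.mp hs).subset (List.mem_cons_self)
    exact hx this

lemma sublist_of_subset_sorted : ∀ {a r : List Int}, a.Pairwise (· < ·) → r.Pairwise (· < ·) →
    (∀ c ∈ a, c ∈ r) → a.Sublist r := by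
  intro a r ha hr hsub
  induction r generalizing a with
  | nil =>
    cases a with
    | nil => exact List.Sublist.refl _
    | cons b a' => exact absurd (hsub b List.mem_cons_self) (by simp)
  | cons y r' ih =>
    cases a with
    | nil => exact List.nil_sublist _
    | cons b a' =>
      have hb : b ∈ y :: r' := hsub b List.mem_cons_self
      by_cases hby : b = y
      · subst hby
        refine List.Sublist.cons₂ _ (ih (List.pairwise_cons.mp ha).2 (List.pairwise_cons.mp hr).2 ?_)
        intro c hc
        have hbc : b < c := (List.pairwise_cons.mp ha).1 c hc
        have : c ∈ b :: r' := hsub c (List.mem_cons_of_mem _ hc)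
        rcases List.mem_cons.mp this with rfl | h
        · omega
        · exact h
      · have hb' : b ∈ r' := (List.mem_cons.mp hb).resolve_left hby
        have hyb : y < b := (List.pairwise_cons.mp hr).1 b hb'
        refine List.Sublist.cons _ (ih ha (List.pairwise_cons.mp hr).2 ?_)
        intro c hc
        have : c ∈ y :: r' := hsub c hc
        rcases List.mem_cons.mp this with rfl | h
        · rcases List.mem_cons.mp hc with rfl | h'
          · exact hb'
          · have : b < c := (List.pairwise_cons.mp ha).1 c h'
            omega
        · exact h

lemma isEmpty_false_iff {r : List Int} : r.isEmpty = false ↔ r ≠ [] := by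
  cases r <;> simp

lemma pB_iff {relation : List (List String)} {r : List Int} :
    pB relation r = true ↔
      r ≠ [] ∧ uniqueB relation r = true ∧
        ∀ s, s.Sublist r → s ≠ [] → s ≠ r → uniqueB relation s = false := by
  simp only [pB, Bool.and_eq_true, List.all_eq_true, Bool.or_eq_true, beq_iff_eq,
    List.isEmpty_iff, Bool.not_eq_true', Bool.or_assoc, isEmpty_false_iff]
  constructor
  · rintro ⟨⟨h1, h2⟩, h3⟩
    refine ⟨h1, h2, fun s hs hs1 hs2 => ?_⟩
    rcases h3 s (mem_subsetsB.mpr hs) with h | h | h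
    · exact absurd h hs1
    · exact absurd h hs2
    · exact h
  · rintro ⟨h1, h2, h3⟩
    refine ⟨⟨h1, h2⟩, fun s hs => ?_⟩
    by_cases e1 : s = ([] : List Int)
    · exact Or.inl e1
    by_cases e2 : s = r
    · exact Or.inr (Or.inl e2)
    · exact Or.inr (Or.inr (h3 s (mem_subsetsB.mp hs) e1 e2))

lemma exists_min (relation : List (List String)) :
    ∀ (k : Nat) (s : List Int), s.length ≤ k → uniqueB relation s = true → s ≠ [] →
      ∃ m, m.Sublist s ∧ pB relation m = true := by
  intro k
  induction k with
  | zero => intro s hs _ hne; cases s with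
    | nil => exact absurd rfl hne
    | cons a t => simp at hs
  | succ k ih =>
    intro s hs hu hne
    by_cases hp : pB relation s = true
    · exact ⟨s, List.Sublist.refl _, hp⟩
    · have : ∃ s', s'.Sublist s ∧ s' ≠ [] ∧ s' ≠ s ∧ uniqueB relation s' = true := by
        by_contra hc
        exact hp (pB_iff.mpr ⟨hne, hu, fun s' h1 h2 h3 => by
          by_contra hq
          exact hc ⟨s', h1, h2, h3, by simpa using hq⟩⟩)
      obtain ⟨s', h1, h2, h3, h4⟩ := this
      have hlt : s'.length < s.length := by
        rcases Nat.lt_or_ge s'.length s.length with h | h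
        · exact h
        · exact absurd (h1.eq_of_length (Nat.le_antisymm h1.length_le h)) h3
      obtain ⟨m, hm1, hm2⟩ := ih s' (by omega) h4 h2
      exact ⟨m, hm1.trans h1, hm2⟩

lemma rowSig_eq : rowSigA = rowSigB := rfl

lemma setfold_eq (relation : List (List String)) (r : List Int) :
    relation.foldl (fun tup row => PySem.Set.add tup (rowSigA row r)) PySem.Set.empty
      = PySem.Set.ofList (relation.map (fun row => rowSigB row r)) := by
  rw [← PySem.Set.update_map_eq_foldl_add, rowSig_eq]
  exact PySem.Set.update_nil_left _

lemma stepA_eq (relation : List (List String)) (ans : List (List Int)) (r : List Int) :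
    stepA relation ans r =
      if uniqueB relation r then (if checkA ans r then ans ++ [r] else ans) else ans := by
  simp only [stepA, setfold_eq, uniqueB]
  rfl

lemma checkA_iff {ans : List (List Int)} {key : List Int} :
    checkA ans key = true ↔ ∀ a ∈ ans, ¬ (∀ c ∈ a, c ∈ key) := by
  induction ans with
  | nil => simp [checkA]
  | cons a0 rest ih =>
    simp only [checkA]
    by_cases h : a0.all (fun c => key.contains c) = true
    · rw [if_pos h]
      constructor
      · intro hf; exact absurd hf (by simp)
      · intro hall
        exact absurd (fun c hc => by simpa using List.all_eq_true.mp h c hc)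
          (hall a0 List.mem_cons_self)
    · rw [if_neg h, ih]
      constructor
      · intro hr b hb
        rcases List.mem_cons.mp hb with rfl | hb'
        · intro hall
          exact h (List.all_eq_true.mpr fun c hc => by simpa using hall c hc)
        · exact hr b hb'
      · intro hall b hb
        exact hall b (List.mem_cons_of_mem _ hb)

-- the main loop invariant: A's stateful fold computes exactly the locally-minimal filter
lemma loopInv (relation : List (List String)) :
    ∀ (K D acc : List (List Int)),
      acc = D.filter (pB relation) →
      (D ++ K).Nodup →
      K.Pairwise (fun a b => a.length ≤ b.length) →
      (∀ r ∈ K, r ≠ []) →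
      (∀ r ∈ D ++ K, r.Pairwise (· < ·)) →
      (∀ r ∈ K, ∀ s, s.Sublist r → s ≠ r → s ≠ [] → s ∈ D ∨ s ∈ K) →
      K.foldl (stepA relation) acc = acc ++ K.filter (pB relation) := by
  intro K
  induction K with
  | nil => intro D acc h1 _ _ _ _ _; simp
  | cons r K ih =>
    intro D acc hacc hnd hlen hne hsort hsub
    have hrD : r ∉ D := by
      exact fun hrd =>
        (List.nodup_append.mp hnd).2.2 r hrd r List.mem_cons_self rfl
    have hrne : r ≠ [] := hne r List.mem_cons_self
    have hrsort : r.Pairwise (· < ·) := hsort r (by simp)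
    have hstep : stepA relation acc r = acc ++ (if pB relation r then [r] else []) := by
      rw [stepA_eq]
      by_cases hu : uniqueB relation r = true
      · rw [if_pos hu]
        by_cases hchk : checkA acc r = true
        · rw [if_pos hchk]
          have hmin : pB relation r = true := by
            refine pB_iff.mpr ⟨hrne, hu, fun s hs hsne hsr => ?_⟩
            by_contra hus
            have hus : uniqueB relation s = true := by simpa using hus
            obtain ⟨m, hm1, hm2⟩ := exists_min relation s.length s le_rfl hus hsne
            have hmr : m.Sublist r := hm1.trans hs
            have hmne : m ≠ [] := (pB_iff.mp hm2).1
            have hmner : m ≠ r := by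
              intro h; subst h
              exact hsr (hs.eq_of_length (Nat.le_antisymm hs.length_le hm1.length_le))
            rcases hsub r List.mem_cons_self m hmr hmner hmne with hD | hK
            · have hmacc : m ∈ acc := by
                rw [hacc]; exact List.mem_filter.mpr ⟨hD, hm2⟩
              exact (checkA_iff.mp hchk m hmacc) (fun c hc => hmr.subset hc)
            · rcases List.mem_cons.mp hK with h | h
              · exact hmner h
              · have hle := (List.pairwise_cons.mp hlen).1 m h
                have hlt : m.length < r.length := by
                  rcases Nat.lt_or_ge m.length r.length with hl | hl
                  · exact hl
                  · exact absurd (hmr.eq_of_length (Nat.le_antisymm hmr.length_le hl)) hmner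
                omega
          rw [if_pos hmin]
        · rw [if_neg hchk]
          have hmin : pB relation r = false := by
            by_contra hh
            have hp : pB relation r = true := by simpa using hh
            apply hchk
            refine checkA_iff.mpr fun a ha hsubm => ?_
            rw [hacc] at ha
            obtain ⟨haD, hap⟩ := List.mem_filter.mp ha
            have hasort : a.Pairwise (· < ·) := hsort a (List.mem_append.mpr (Or.inl haD))
            have har : a.Sublist r := sublist_of_subset_sorted hasort hrsort hsubm
            have hane : a ≠ [] := (pB_iff.mp hap).1
            have haner : a ≠ r := fun h => hrD (h ▸ haD)
            have hfalse := (pB_iff.mp hp).2.2 a har hane haner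
            simp [(pB_iff.mp hap).2.1] at hfalse
          simp [hmin]
      · rw [if_neg hu]
        have hmin : pB relation r = false := by
          by_contra hh
          exact hu ((pB_iff.mp (by simpa using hh)).2.1)
        simp [hmin]
    rw [List.foldl_cons, hstep]
    have hacc' : acc ++ (if pB relation r then [r] else []) = (D ++ [r]).filter (pB relation) := by
      rw [List.filter_append, hacc]; cases hp : pB relation r <;> simp [hp]
    have hrec := ih (D ++ [r]) (acc ++ (if pB relation r then [r] else [])) hacc'
      (by rw [List.append_assoc]; simpa using hnd)
      ((List.pairwise_cons.mp hlen).2)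
      (fun r' hr' => hne r' (List.mem_cons_of_mem _ hr'))
      (by
        intro x hx
        apply hsort
        simp only [List.mem_append, List.mem_cons] at hx ⊢
        tauto)
      (by
        intro r' hr' s hs1 hs2 hs3
        rcases hsub r' (List.mem_cons_of_mem _ hr') s hs1 hs2 hs3 with h | h
        · exact Or.inl (List.mem_append.mpr (Or.inl h))
        · rcases List.mem_cons.mp h with rfl | h'
          · exact Or.inl (List.mem_append.mpr (Or.inr List.mem_cons_self))
          · exact Or.inr h')
    rw [hrec]
    cases hp : pB relation r <;> simp [hp]

-- the flattened enumeration A processes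
def enumA (columns : List Int) : List (List Int) :=
  ((PySem.List.pyRange 1 ((columns.length : Int) + 1) 1).map
    (fun i => PySem.List.combinations columns i.toNat)).flatten

lemma nodup_combinations : ∀ (l : List Int) (k : Nat), l.Nodup →
    (PySem.List.combinations l k).Nodup := by
  intro l
  induction l with
  | nil =>
    intro k _
    cases k with
    | zero => simp [PySem.List.combinations_zero]
    | succ k => simp [PySem.List.combinations_nil_succ]
  | cons x xs ih =>
    intro k hnd
    cases k with
    | zero => simp [PySem.List.combinations_zero]
    | succ k =>
      rw [PySem.List.combinations_cons_succ]
      have hx : x ∉ xs := (List.nodup_cons.mp hnd).1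
      have h2 := (List.nodup_cons.mp hnd).2
      refine List.Nodup.append
        (List.Nodup.map (fun a b hab => by injection hab) (ih k h2)) (ih (k+1) h2) ?_
      intro c hc1 hc2
      obtain ⟨t, _, rfl⟩ := List.mem_map.mp hc1
      exact hx ((PySem.List.sublist_of_mem_combinations hc2).subset List.mem_cons_self)

lemma mem_enumA {columns r : List Int} :
    r ∈ enumA columns ↔ r.Sublist columns ∧ r ≠ [] := by
  unfold enumA
  rw [List.mem_flatten]
  constructor
  · rintro ⟨l, hl, hrl⟩
    obtain ⟨i, hi, rfl⟩ := List.mem_map.mp hl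
    have hi' := PySem.List.mem_pyRange_one.mp hi
    have hm := (PySem.List.mem_combinations_iff _ _ _).mp hrl
    refine ⟨hm.1, fun h => ?_⟩
    have hz : r.length = 0 := by simp [h]
    have := hm.2
    omega
  · rintro ⟨hsub, hne⟩
    refine ⟨PySem.List.combinations columns r.length, List.mem_map.mpr ⟨(r.length : Int), ?_, by simp⟩, ?_⟩
    · refine PySem.List.mem_pyRange_one.mpr ⟨?_, ?_⟩
      · have : 0 < r.length := List.length_pos_iff.mpr hne
        omega
      · have := hsub.length_le
        omega
    · exact (PySem.List.mem_combinations_iff _ _ _).mpr ⟨hsub, rfl⟩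

lemma nodup_enumA {columns : List Int} (hc : columns.Nodup) : (enumA columns).Nodup := by
  unfold enumA
  rw [List.nodup_flatten]
  constructor
  · intro l hl
    obtain ⟨i, _, rfl⟩ := List.mem_map.mp hl
    exact nodup_combinations _ _ hc
  · rw [List.pairwise_map]
    refine List.Pairwise.imp_of_mem ?_ (PySem.List.pairwise_lt_pyRange_one 1 _)
    intro i j hi hj hij c hc1 hc2
    have h1 := (PySem.List.mem_combinations_iff _ _ _).mp hc1 |>.2
    have h2 := (PySem.List.mem_combinations_iff _ _ _).mp hc2 |>.2
    have hi1 : 1 ≤ i := (PySem.List.mem_pyRange_one.mp hi).1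
    have hj1 : 1 ≤ j := (PySem.List.mem_pyRange_one.mp hj).1
    omega

lemma lenle_enumA {columns : List Int} :
    (enumA columns).Pairwise (fun a b => a.length ≤ b.length) := by
  unfold enumA
  rw [List.pairwise_flatten]
  constructor
  · intro l hl
    obtain ⟨i, _, rfl⟩ := List.mem_map.mp hl
    have hall : ∀ a ∈ PySem.List.combinations columns i.toNat, a.length = i.toNat :=
      fun a ha => PySem.List.length_of_mem_combinations ha
    exact List.pairwise_of_forall_mem_list (fun a ha b hb => by rw [hall a ha, hall b hb])
  · rw [List.pairwise_map]
    refine List.Pairwise.imp_of_mem ?_ (PySem.List.pairwise_lt_pyRange_one 1 _)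
    intro i j hi hj hij a ha b hb
    have h1 := (PySem.List.mem_combinations_iff _ _ _).mp ha |>.2
    have h2 := (PySem.List.mem_combinations_iff _ _ _).mp hb |>.2
    have hi1 : 1 ≤ i := (PySem.List.mem_pyRange_one.mp hi).1
    omega

lemma solution_eq_filter (relation : List (List String)) :
    solution relation =
      (((enumA (PySem.List.pyRange 0
          (PySem.List.len ((PySem.List.pyGet? relation 0).getD [])) 1)).filter
        (pB relation)).length : Int) := by
  set first := (PySem.List.pyGet? relation 0).getD [] with hF
  set cols := PySem.List.pyRange 0 (PySem.List.len first) 1 with hC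
  have h0 : solution relation =
      PySem.List.len
        ((PySem.List.pyRange 1 (PySem.List.len first + 1) 1).foldl
          (fun answer i =>
            (PySem.List.combinations cols i.toNat).foldl (stepA relation) answer)
          ([] : List (List Int))) := by
    rw [hC, hF]
    rfl
  have hlen : ((cols.length : Int)) + 1 = PySem.List.len first + 1 := by
    rw [hC, PySem.List.length_pyRange_one, PySem.List.len_eq]
    omega
  have h1 : (enumA cols).foldl (stepA relation) ([] : List (List Int)) =
      (PySem.List.pyRange 1 (PySem.List.len first + 1) 1).foldl
        (fun answer i =>
          (PySem.List.combinations cols i.toNat).foldl (stepA relation) answer)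
        ([] : List (List Int)) := by
    unfold enumA
    rw [List.foldl_flatten, List.foldl_map, hlen]
  have hcolnodup : cols.Nodup := by rw [hC]; exact PySem.List.nodup_pyRange_one _ _
  have hcolsort : cols.Pairwise (· < ·) := by
    rw [hC]; exact PySem.List.pairwise_lt_pyRange_one _ _
  have hinv := loopInv relation (enumA cols) [] []
    (by simp)
    (by simpa using nodup_enumA hcolnodup)
    lenle_enumA
    (fun r hr => (mem_enumA.mp hr).2)
    (by
      intro x hx
      have hx' : x ∈ enumA cols := by simpa using hx
      exact List.Pairwise.sublist (mem_enumA.mp hx').1 hcolsort)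
    (by
      intro r hr s hs1 hs2 hs3
      exact Or.inr (mem_enumA.mpr ⟨hs1.trans (mem_enumA.mp hr).1, hs3⟩))
  rw [h0, ← h1, hinv, PySem.List.len_eq]
  simp

lemma solution_alt_eq_filter (relation : List (List String)) :
    solution_alt relation =
      (((subsetsB (PySem.List.pyRange 0
          (PySem.List.len ((PySem.List.pyGet? relation 0).getD [])) 1)).filter
        (pB relation)).length : Int) := by
  have h : solution_alt relation =
      (subsetsB (PySem.List.pyRange 0
          (PySem.List.len ((PySem.List.pyGet? relation 0).getD [])) 1)).foldl
        (fun count r => if pB relation r then count + 1 else count) 0 := rfl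
  rw [h, PySem.List.foldl_if_add_one, List.countP_eq_length_filter]
  omega

-- ===== VERDICT (by name: the statement is the Claim_ definition above) =====
theorem solution_spec : Claim_equal_solution := by
  intro relation _ _
  unfold Spec_solution
  rw [solution_eq_filter, solution_alt_eq_filter]
  have hndc : (PySem.List.pyRange 0
      (PySem.List.len ((PySem.List.pyGet? relation 0).getD [])) 1).Nodup :=
    PySem.List.nodup_pyRange_one _ _
  have hperm :
      ((enumA (PySem.List.pyRange 0
          (PySem.List.len ((PySem.List.pyGet? relation 0).getD [])) 1)).filter
        (pB relation)).Perm
      ((subsetsB (PySem.List.pyRange 0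
          (PySem.List.len ((PySem.List.pyGet? relation 0).getD [])) 1)).filter
        (pB relation)) := by
    rw [List.perm_ext_iff_of_nodup ((nodup_enumA hndc).filter _) ((nodup_subsetsB hndc).filter _)]
    intro a
    simp only [List.mem_filter, mem_enumA, mem_subsetsB]
    constructor
    · rintro ⟨⟨h1, _⟩, h2⟩; exact ⟨h1, h2⟩
    · rintro ⟨h1, h2⟩; exact ⟨⟨h1, (pB_iff.mp h2).1⟩, h2⟩
  rw [hperm.length_eq]
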